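-- pv_equiv track=rewrite | github.com/Sablayrolles/debates | step2_M1/features/wordFeatures.py | namesCandidates
-- ===== SOURCE A (Python) =====
-- def namesCandidates(words, names):
-- 	"""
-- 		def namesCandidates(words, names)
-- 		---------------------------------
--
-- 		return the number of names of candidates
--
-- 		:param words: list of tokens of the EDU
-- 		:param names: list of names of candidates
-- 		:type words: string list
-- 		:type names: string list
-- 		:return: nb of names of candidates
-- 		:rtype: int
-- 	"""
-- 	nbNames = 0
--
-- 	for i in range(len(names)):
-- 		names[i] = names[i].lower()
--
-- 	for w in words:
-- 		if w.lower() in names: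
-- 			nbNames += 1
--
-- 	return nbNames
-- ===== SOURCE B (Python) =====
-- def namesCandidates(words, names):
--     for i in range(len(names)):
--         names[i] = names[i].lower()
--     counts = {}
--     for w in words:
--         lw = w.lower()
--         counts[lw] = counts.get(lw, 0) + 1
--     nameSet = set(names)
--     total = 0
--     for w, c in counts.items():
--         if w in nameSet:
--             total += c
--     return total
-- ===== Notes on version B (the rewrite author's own statement) =====
-- stated objective: faster
-- what changed: B aggregates the lowercased words into a frequency table (dict) first and then makes one pass over the table's distinct keys, summing the multiplicities of keys found in the set of lowered names, instead of scanning the names list once per word occurrence.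
import Mathlib
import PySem

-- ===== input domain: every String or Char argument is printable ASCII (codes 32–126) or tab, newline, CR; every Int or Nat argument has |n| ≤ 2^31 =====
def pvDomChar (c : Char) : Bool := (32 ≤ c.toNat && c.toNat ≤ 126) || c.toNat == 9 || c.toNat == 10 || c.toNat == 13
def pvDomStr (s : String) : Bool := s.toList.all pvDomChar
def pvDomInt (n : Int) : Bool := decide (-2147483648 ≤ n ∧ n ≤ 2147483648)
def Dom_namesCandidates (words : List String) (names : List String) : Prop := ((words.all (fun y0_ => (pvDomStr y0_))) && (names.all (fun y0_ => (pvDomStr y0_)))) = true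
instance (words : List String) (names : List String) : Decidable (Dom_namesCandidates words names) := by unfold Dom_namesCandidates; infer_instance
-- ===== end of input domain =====

-- B: frequency table over lowered words + one pass over its distinct keys against a names set (asymptotically faster)
-- (alternative decomposition; same return value; both versions' mutation of `names` is modelled
-- by the local lowered copy — return-value equivalence is what is proved).

-- ===== PORT A =====
-- for i in range(len(names)): names[i] = names[i].lower()  — the in-place lowering loop
def namesCandidates (words : List String) (names : List String) : Int :=
  let names' := names.map PySem.Str.lower
  words.foldl (fun acc w => if PySem.Str.lower w ∈ names' then acc + 1 else acc) 0

-- ===== PORT B =====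
def namesCandidates_alt (words : List String) (names : List String) : Int :=
  let names' := names.map PySem.Str.lower
  let counts := words.foldl
    (fun d w => d.insert (PySem.Str.lower w) (d.getD (PySem.Str.lower w) 0 + 1))
    PySem.Dict.empty
  let nameSet : PySem.Set String := PySem.Set.ofList names'
  counts.items.foldl (fun acc p => if p.1 ∈ nameSet then acc + p.2 else acc) 0

-- ===== PRECONDITION & SPEC =====
def Spec_namesCandidates (words : List String) (names : List String) (out : Int) : Prop := out = namesCandidates_alt words names
instance (words : List String) (names : List String) (out : Int) : Decidable (Spec_namesCandidates words names out) := by unfold Spec_namesCandidates; infer_instance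

-- ===== CLAIM (what is proved, stated in full; the proofs are below) =====
def Claim_equal_namesCandidates : Prop := ∀ (words : List String) (names : List String), Dom_namesCandidates words names → Spec_namesCandidates words names (namesCandidates words names)

-- ===== LEMMAS AND PROOFS =====

-- Int-valued count of elements of `ls` that are in `S`
def cntIn (S : List String) : List String → Int
  | [] => 0
  | x :: tl => (if x ∈ S then 1 else 0) + cntIn S tl

theorem foldl_if_cntIn (S : List String) (ls : List String) (acc : Int) :
    ls.foldl (fun a k => if k ∈ S then a + 1 else a) acc = acc + cntIn S ls := by
  induction ls generalizing acc with
  | nil => simp [cntIn]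
  | cons x tl ih =>
    simp only [List.foldl_cons, cntIn]
    rw [ih]
    split_ifs <;> ring

theorem foldl_if_sum (S : List String) (L : List (String × Int)) (acc : Int) :
    L.foldl (fun a p => if p.1 ∈ S then a + p.2 else a) acc
      = acc + (L.map (fun p => if p.1 ∈ S then p.2 else 0)).sum := by
  induction L generalizing acc with
  | nil => simp
  | cons p tl ih =>
    simp only [List.foldl_cons, List.map_cons, List.sum_cons]
    rw [ih]
    split_ifs <;> ring

theorem sum_map_single {α : Type} [DecidableEq α] (d : List α) (hd : d.Nodup)
    (x : α) (hx : x ∈ d) (g : α → Int) (hz : ∀ y, y ≠ x → g y = 0) :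
    (d.map g).sum = g x := by
  induction d with
  | nil => cases hx
  | cons a tl ih =>
    rcases List.mem_cons.mp hx with h | h
    · subst h
      have hzt : ∀ y ∈ tl, g y = 0 := fun y hy =>
        hz y (fun e => (List.nodup_cons.mp hd).1 (e ▸ hy))
      have hs : (tl.map g).sum = 0 := List.sum_eq_zero (fun v hv => by
        rcases List.mem_map.mp hv with ⟨z, hzz, rfl⟩; exact hzt z hzz)
      simp [hs]
    · rw [List.map_cons, List.sum_cons,
        hz a (fun e => (List.nodup_cons.mp hd).1 (e ▸ h)),
        ih (List.nodup_cons.mp hd).2 h]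
      ring

theorem sum_counts (S : List String) (ls : List String)
    (d : List String) (hd : d.Nodup) (hsub : ∀ x ∈ ls, x ∈ d) :
    (d.map (fun k => if k ∈ S then (ls.count k : Int) else 0)).sum = cntIn S ls := by
  induction ls with
  | nil => simp [cntIn]
  | cons x tl ih =>
    have hx : x ∈ d := hsub x (by simp)
    have hsub' : ∀ y ∈ tl, y ∈ d := fun y hy => hsub y (List.mem_cons_of_mem _ hy)
    have hsplit : ∀ k, (if k ∈ S then (((x :: tl).count k : Int)) else 0)
        = (if k ∈ S then ((tl.count k : Int)) else 0)
          + (if k ∈ S ∧ k = x then 1 else 0) := by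
      intro k
      by_cases hk : k ∈ S
      · by_cases he : k = x
        · subst he
          simp only [hk, if_true, and_self, List.count_cons_self]
          push_cast; ring
        · rw [List.count_cons_of_ne (Ne.symm he), if_pos hk,
            if_neg (fun h => he h.2)]
          ring
      · simp [hk]
    calc (d.map fun k => if k ∈ S then ((x :: tl).count k : Int) else 0).sum
        = (d.map fun k => (if k ∈ S then ((tl.count k : Int)) else 0)
            + (if k ∈ S ∧ k = x then 1 else 0)).sum := by
          congr 1; exact List.map_congr_left (fun k _ => hsplit k)
      _ = (d.map fun k => if k ∈ S then ((tl.count k : Int)) else 0).sum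
            + (d.map fun k => if k ∈ S ∧ k = x then 1 else 0).sum := by
          rw [← List.sum_map_add]
      _ = cntIn S tl + (if x ∈ S then 1 else 0) := by
          rw [ih hsub',
            sum_map_single d hd x hx _ (fun y hy => by simp [hy])]
          simp
      _ = cntIn S (x :: tl) := by simp [cntIn]; ring

theorem key_counts (ls S : List String) :
    ls.foldl (fun acc k => if k ∈ S then acc + (1 : Int) else acc) 0
      = (PySem.Dict.counter ls).items.foldl
          (fun acc p => if p.1 ∈ PySem.Set.ofList S then acc + p.2 else acc) 0 := by
  rw [PySem.Dict.items_counter, foldl_if_cntIn, foldl_if_sum, List.map_map]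
  simp only [PySem.Set.mem_ofList, zero_add]
  exact (sum_counts S ls (PySem.Set.ofList ls) (PySem.Set.nodup_ofList ls)
    (fun x hx => (PySem.Set.mem_ofList ls x).mpr hx)).symm

theorem namesCandidates_spec' (words names : List String) :
    namesCandidates words names = namesCandidates_alt words names := by
  unfold namesCandidates namesCandidates_alt
  simp only
  rw [show words.foldl
        (fun (d : PySem.Dict String Int) w =>
          d.insert (PySem.Str.lower w) (d.getD (PySem.Str.lower w) 0 + 1))
        PySem.Dict.empty
        = PySem.Dict.counter (words.map PySem.Str.lower) from by
      rw [← PySem.Dict.foldl_insert_getD_add_one_eq_counter, List.foldl_map],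
    show words.foldl
        (fun acc w => if PySem.Str.lower w ∈ names.map PySem.Str.lower
          then acc + (1 : Int) else acc) 0
        = (words.map PySem.Str.lower).foldl
            (fun acc k => if k ∈ names.map PySem.Str.lower then acc + 1 else acc) 0 from by
      rw [List.foldl_map]]
  exact key_counts _ _

-- ===== VERDICT (by name: the statement is the Claim_ definition above) =====
theorem namesCandidates_spec : Claim_equal_namesCandidates := by
  intro words names _
  unfold Spec_namesCandidates
  exact namesCandidates_spec' words names
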